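-- pv_equiv track=rewrite | github.com/andrewpickett/advent-of-code | 2024/python/day22/main.py | calc_secret
-- ===== SOURCE A (Python) =====
-- def calc_secret(x, secrets):
-- 	last = x % 10
-- 	pattern = []
-- 	i = x
-- 	for _ in range(2000):
-- 		i = ((i*64) ^ i) % 16777216
-- 		i = ((i // 32) ^ i) % 16777216
-- 		i = ((i * 2048) ^ i) % 16777216
-- 		temp = i % 10
-- 		pattern.append((temp - last, temp))
-- 		last = temp
-- 	secrets[x] = i
-- 	return pattern
-- ===== SOURCE B (Python) =====
-- # The xorshift step is linear over GF(2) on 24-bit state: each substep is a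
-- # shift, xor and truncation, all bit-linear.  So one step equals the xor of the
-- # images of the set bits of the state.  B precomputes the images of the 24
-- # basis vectors once and applies the step as a table-driven xor fold, then
-- # derives the pattern in a second pairwise pass over the materialised digits.
--
-- def _basis_image(v):
--     v = ((v * 64) ^ v) % 16777216
--     v = ((v // 32) ^ v) % 16777216
--     return ((v * 2048) ^ v) % 16777216
--
--
-- BASIS = [_basis_image(1 << b) for b in range(24)]
--
--
-- def _next(i):
--     r = 0
--     for b in range(24):
--         if (i >> b) & 1:
--             r ^= BASIS[b]
--     return r
--
--
-- def calc_secret(x, secrets):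
--     digits = [x % 10]
--     i = x % 16777216
--     for _ in range(2000):
--         i = _next(i)
--         digits.append(i % 10)
--     secrets[x] = i
--     return [(q - p, q) for p, q in zip(digits, digits[1:])]
-- ===== Notes on version B (the rewrite author's own statement) =====
-- stated objective: alternative
-- what changed: B exploits that the xorshift step is a GF(2)-linear map on 24-bit state: it precomputes the step's images of the 24 basis vectors once at module load and applies each step as a table-driven xor-fold over the set bits of the state (after reducing the seed mod 2^24), then derives the (delta, digit) pattern in a separate pairwise pass over the materialised digit stream, instead of A's fused shift/xor arithmetic loop with a 'last' accumulator.
import Mathlib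
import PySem

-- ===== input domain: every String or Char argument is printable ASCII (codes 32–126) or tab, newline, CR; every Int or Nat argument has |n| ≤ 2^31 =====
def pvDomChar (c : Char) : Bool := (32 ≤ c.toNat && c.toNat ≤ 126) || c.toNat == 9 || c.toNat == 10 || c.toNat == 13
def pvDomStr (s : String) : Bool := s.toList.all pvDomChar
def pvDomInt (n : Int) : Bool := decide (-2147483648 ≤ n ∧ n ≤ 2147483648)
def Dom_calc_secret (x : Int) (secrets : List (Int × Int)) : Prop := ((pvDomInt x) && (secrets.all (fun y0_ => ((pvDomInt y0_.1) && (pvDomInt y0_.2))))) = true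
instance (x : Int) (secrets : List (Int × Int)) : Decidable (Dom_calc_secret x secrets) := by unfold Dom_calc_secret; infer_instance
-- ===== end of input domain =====

-- B applies the (GF(2)-linear) xorshift step via 24 precomputed basis images and a bitwise
-- xor-fold, and extracts the pattern in a second pairwise pass over the materialised digit
-- stream (objective: alternative; same asymptotic cost).  Both Pythons mutate `secrets` in
-- place identically (secrets[x] = final secret); the equivalence proved here is about the
-- RETURN value (the pattern list).

-- ===== PORT A =====
def calc_secret (x : Int) (secrets : List (Int × Int)) : List (Int × Int) :=
  ((List.range 2000).foldl (fun st _ =>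
      let i1 := PySem.Int.mod (PySem.Int.bxor (st.2.1 * 64) st.2.1) 16777216
      let i2 := PySem.Int.mod (PySem.Int.bxor (PySem.Int.floordiv i1 32) i1) 16777216
      let i3 := PySem.Int.mod (PySem.Int.bxor (i2 * 2048) i2) 16777216
      let temp := PySem.Int.mod i3 10
      (temp, i3, st.2.2 ++ [(temp - st.1, temp)]))
    (PySem.Int.mod x 10, x, ([] : List (Int × Int)))).2.2

-- ===== PORT B =====
def pvBasisImage (v : Int) : Int :=
  let v1 := PySem.Int.mod (PySem.Int.bxor (v * 64) v) 16777216
  let v2 := PySem.Int.mod (PySem.Int.bxor (PySem.Int.floordiv v1 32) v1) 16777216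
  PySem.Int.mod (PySem.Int.bxor (v2 * 2048) v2) 16777216

def pvBASIS : List Int := (List.range 24).map (fun (b : Nat) => pvBasisImage ((1 : Int) <<< b))

-- BASIS[b]: b runs over range(24) and len(BASIS) = 24, so the Python index is always in
-- range; List.getD is exact there.
def pvNext (i : Int) : Int :=
  (List.range 24).foldl (fun (r : Int) (b : Nat) =>
    if PySem.Int.band (i >>> b) 1 ≠ 0 then PySem.Int.bxor r (pvBASIS.getD b 0) else r) 0

def calc_secret_alt (x : Int) (secrets : List (Int × Int)) : List (Int × Int) :=
  let st := (List.range 2000).foldl (fun st _ =>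
      let i := pvNext st.1
      (i, st.2 ++ [PySem.Int.mod i 10]))
    (PySem.Int.mod x 16777216, [PySem.Int.mod x 10])
  ((st.2.zip (PySem.List.slice st.2 (some 1) none)).map (fun p => (p.2 - p.1, p.2)))

-- ===== PRECONDITION & SPEC =====
def Spec_calc_secret (x : Int) (secrets : List (Int × Int)) (out : List (Int × Int)) : Prop := out = calc_secret_alt x secrets
instance (x : Int) (secrets : List (Int × Int)) (out : List (Int × Int)) : Decidable (Spec_calc_secret x secrets out) := by unfold Spec_calc_secret; infer_instance

-- ===== CLAIM =====
def Claim_equal_calc_secret : Prop := ∀ (x : Int) (secrets : List (Int × Int)), Dom_calc_secret x secrets → Spec_calc_secret x secrets (calc_secret x secrets)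

-- ===== LEMMAS AND PROOFS =====

-- the xorshift step on Nat (24-bit truncations written as % 16777216)
def s1N (i : Nat) : Nat := ((i <<< 6) ^^^ i) % 16777216
def s2N (i : Nat) : Nat := ((i >>> 5) ^^^ i) % 16777216
def s3N (i : Nat) : Nat := ((i <<< 11) ^^^ i) % 16777216
def stepN (i : Nat) : Nat := s3N (s2N (s1N i))

-- the last two substeps of pvBasisImage, as a function of the first substep's output
def restI (j : Int) : Int :=
  PySem.Int.mod (PySem.Int.bxor ((PySem.Int.mod (PySem.Int.bxor (PySem.Int.floordiv j 32) j) 16777216) * 2048)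
    (PySem.Int.mod (PySem.Int.bxor (PySem.Int.floordiv j 32) j) 16777216)) 16777216

theorem s1N_lin (a b : Nat) : s1N (a ^^^ b) = s1N a ^^^ s1N b := by
  unfold s1N
  rw [show (16777216:Nat) = 2^24 from by norm_num]
  apply Nat.eq_of_testBit_eq; intro i
  simp only [Nat.testBit_mod_two_pow, Nat.testBit_xor, Nat.testBit_shiftLeft]
  cases decide (i < 24) <;> cases a.testBit i <;> cases b.testBit i <;>
    cases decide (i ≥ 6) <;> cases a.testBit (i-6) <;> cases b.testBit (i-6) <;> simp

theorem s2N_lin (a b : Nat) : s2N (a ^^^ b) = s2N a ^^^ s2N b := by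
  unfold s2N
  rw [show (16777216:Nat) = 2^24 from by norm_num]
  apply Nat.eq_of_testBit_eq; intro i
  simp only [Nat.testBit_mod_two_pow, Nat.testBit_xor, Nat.testBit_shiftRight]
  cases decide (i < 24) <;> cases a.testBit i <;> cases b.testBit i <;>
    cases a.testBit (5+i) <;> cases b.testBit (5+i) <;> simp

theorem s3N_lin (a b : Nat) : s3N (a ^^^ b) = s3N a ^^^ s3N b := by
  unfold s3N
  rw [show (16777216:Nat) = 2^24 from by norm_num]
  apply Nat.eq_of_testBit_eq; intro i
  simp only [Nat.testBit_mod_two_pow, Nat.testBit_xor, Nat.testBit_shiftLeft]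
  cases decide (i < 24) <;> cases a.testBit i <;> cases b.testBit i <;>
    cases decide (i ≥ 11) <;> cases a.testBit (i-11) <;> cases b.testBit (i-11) <;> simp

theorem stepN_lin (a b : Nat) : stepN (a ^^^ b) = stepN a ^^^ stepN b := by
  unfold stepN; rw [s1N_lin, s2N_lin, s3N_lin]

theorem s1N_low (a : Nat) : s1N (a % 16777216) = s1N a := by
  unfold s1N
  rw [show (16777216:Nat) = 2^24 from by norm_num]
  apply Nat.eq_of_testBit_eq; intro i
  simp only [Nat.testBit_mod_two_pow, Nat.testBit_xor, Nat.testBit_shiftLeft]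
  by_cases h24 : i < 24
  · by_cases h6 : i ≥ 6 <;> simp [h24, h6, show i - 6 < 24 by omega]
  · simp [h24]

theorem stepN_low (a : Nat) : stepN (a % 16777216) = stepN a := by
  unfold stepN; rw [s1N_low]

theorem stepN_lt (a : Nat) : stepN a < 16777216 := by
  unfold stepN s3N; exact Nat.mod_lt _ (by norm_num)

theorem stepN_zero : stepN 0 = 0 := by decide

theorem rest_bridge (n : Nat) : restI (n : Int) = ((s3N (s2N n) : Nat) : Int) := by
  unfold restI s2N s3N
  rw [show ((32:Int)) = ((32:Nat):Int) from rfl, PySem.Int.floordiv_natCast,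
      PySem.Int.bxor_natCast,
      show ((16777216:Int)) = ((16777216:Nat):Int) from rfl, PySem.Int.mod_natCast]
  rw [show (((n/32 ^^^ n) % 16777216 : Nat) : Int) * 2048 = (((n/32 ^^^ n) % 16777216) * 2048 : Nat) from by push_cast; ring,
      PySem.Int.bxor_natCast, PySem.Int.mod_natCast]
  simp [Nat.shiftRight_eq_div_pow, Nat.shiftLeft_eq, Nat.mul_comm]

theorem pvBasisImage_eq_restI (v : Int) :
    pvBasisImage v = restI (PySem.Int.mod (PySem.Int.bxor (v * 64) v) 16777216) := rfl

theorem testBit63 (i : Nat) : (63:Nat).testBit i = decide (i < 6) := by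
  rw [show (63:Nat) = 2^6 - 1 from rfl, Nat.testBit_two_pow_sub_one]

theorem pos_bridge (m : Nat) : pvBasisImage (m : Int) = ((stepN m : Nat) : Int) := by
  rw [pvBasisImage_eq_restI,
      show ((m:Int) * 64) = ((m*64 : Nat) : Int) from by push_cast; ring,
      PySem.Int.bxor_natCast,
      show ((16777216:Int)) = ((16777216:Nat):Int) from rfl, PySem.Int.mod_natCast,
      rest_bridge]
  unfold stepN s1N
  simp [Nat.shiftLeft_eq]

theorem neg_bridge (x : Int) (hx : x < 0) :
    pvBasisImage x = ((stepN (PySem.Int.mod x 16777216).toNat : Nat) : Int) := by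
  set m : Nat := (-x - 1).toNat with hmdef
  have h64 : ¬ (0 ≤ x * 64) := by omega
  have hxneg : ¬ (0 ≤ x) := by omega
  have hbx : PySem.Int.bxor (x * 64) x = (((2^6 * m + 63) ^^^ m : Nat) : Int) := by
    unfold PySem.Int.bxor
    rw [if_neg h64, if_neg hxneg]
    congr 2
    omega
  have hr : (PySem.Int.mod x 16777216).toNat = 2^24 - (m % 2^24 + 1) := by
    rw [PySem.Int.mod_eq_emod_of_pos (by norm_num)]
    omega
  rw [pvBasisImage_eq_restI, hbx,
      show ((16777216:Int)) = ((16777216:Nat):Int) from rfl, PySem.Int.mod_natCast]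
  have key : ((2^6 * m + 63) ^^^ m) % 16777216 = s1N (PySem.Int.mod x 16777216).toNat := by
    rw [hr]
    unfold s1N
    rw [show (16777216:Nat) = 2^24 from by norm_num]
    apply Nat.eq_of_testBit_eq; intro i
    have hmlt : m % 2^24 < 2^24 := Nat.mod_lt _ (by norm_num)
    simp only [Nat.testBit_mod_two_pow, Nat.testBit_xor, Nat.testBit_shiftLeft,
      Nat.testBit_two_pow_mul_add m (show (63:Nat) < 2^6 by norm_num),
      Nat.testBit_two_pow_sub_succ hmlt]
    by_cases h24 : i < 24
    · by_cases h6 : i < 6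
      · simp [h24, h6, show ¬ 6 ≤ i from by omega, testBit63]
      · simp [h24, h6, show i ≥ 6 from by omega, show i - 6 < 24 from by omega]
    · simp [h24]
  rw [key]
  exact rest_bridge _

theorem main_bridge (x : Int) :
    pvBasisImage x = ((stepN (PySem.Int.mod x 16777216).toNat : Nat) : Int) := by
  by_cases h : 0 ≤ x
  · obtain ⟨n, rfl⟩ := Int.eq_ofNat_of_zero_le h
    rw [pos_bridge,
        show ((16777216:Int)) = ((16777216:Nat):Int) from rfl, PySem.Int.mod_natCast]
    rw [Int.toNat_natCast, stepN_low]
  · exact neg_bridge x (by omega)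

theorem mod_stepN_cast (k : Nat) : PySem.Int.mod ((stepN k : Nat) : Int) 16777216 = ((stepN k : Nat) : Int) := by
  rw [show ((16777216:Int)) = ((16777216:Nat):Int) from rfl, PySem.Int.mod_natCast,
      Nat.mod_eq_of_lt (stepN_lt k)]

theorem basis_getD (b : Nat) (hb : b < 24) : pvBASIS.getD b 0 = ((stepN (2^b) : Nat) : Int) := by
  unfold pvBASIS
  rw [List.getD_eq_getElem?_getD, List.getElem?_map, List.getElem?_range hb]
  simp only [Option.map_some, Option.getD_some]
  rw [show ((1:Int) <<< b) = ((2^b : Nat) : Int) from by simp [Int.shiftLeft_eq]]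
  exact pos_bridge _

theorem mod_succ_pow (n j : Nat) :
    n % 2^(j+1) = if n.testBit j then (n % 2^j) ^^^ 2^j else n % 2^j := by
  apply Nat.eq_of_testBit_eq; intro i
  by_cases hij : i = j
  · subst hij
    by_cases hb : n.testBit i <;>
      simp [hb, Nat.testBit_mod_two_pow, Nat.testBit_xor]
  · have hd : decide (i ≤ j) = decide (i < j) := decide_eq_decide.mpr (by omega)
    by_cases hb : n.testBit j <;>
      simp [hb, Nat.testBit_mod_two_pow, Nat.testBit_xor, hd,
        show ¬ (j = i) from fun h => hij h.symm]

theorem band_one_testBit (k : Nat) (j : Nat) :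
    (PySem.Int.band ((k : Int) >>> j) 1 ≠ 0) ↔ k.testBit j := by
  rw [show ((k : Int) >>> j) = ((k >>> j : Nat) : Int) from by
        simp [Int.shiftRight_eq, Int.natCast_shiftRight]]
  rw [show ((1:Int)) = ((1:Nat):Int) from rfl, PySem.Int.band_natCast]
  rw [Nat.and_one_is_mod, Nat.testBit_eq_decide_div_mod_eq, Nat.shiftRight_eq_div_pow]
  constructor
  · intro h; simp only [decide_eq_true_eq]; omega
  · intro h; simp only [decide_eq_true_eq] at h
    simp only [ne_eq]
    omega

theorem pvNext_natCast (n : Nat) : pvNext (n : Int) = ((stepN (n % 16777216) : Nat) : Int) := by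
  have main : ∀ j : Nat, j ≤ 24 →
      (List.range j).foldl (fun (r : Int) (b : Nat) =>
        if PySem.Int.band ((n : Int) >>> b) 1 ≠ 0 then PySem.Int.bxor r (pvBASIS.getD b 0) else r) 0
      = ((stepN (n % 2^j) : Nat) : Int) := by
    intro j
    induction j with
    | zero => intro _; simp [Nat.mod_one, stepN_zero]
    | succ j ih =>
      intro hj
      rw [List.range_succ, List.foldl_append, List.foldl_cons, List.foldl_nil,
          ih (by omega)]
      by_cases hb : n.testBit j
      · rw [if_pos ((band_one_testBit n j).mpr hb)]
        rw [basis_getD j (by omega), PySem.Int.bxor_natCast, ← stepN_lin,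
            mod_succ_pow, if_pos hb]
      · rw [if_neg (fun h => hb ((band_one_testBit n j).mp h))]
        rw [mod_succ_pow, if_neg (by simp [hb])]
  have := main 24 (le_refl 24)
  unfold pvNext
  rw [this]
  norm_num

theorem pvNext_mod (x : Int) : pvNext (PySem.Int.mod x 16777216) = pvBasisImage x := by
  have h0 : 0 ≤ PySem.Int.mod x 16777216 := PySem.Int.mod_nonneg x (by norm_num)
  have hlt : PySem.Int.mod x 16777216 < 16777216 := PySem.Int.mod_lt x (by norm_num)
  have hc : PySem.Int.mod x 16777216 = (((PySem.Int.mod x 16777216).toNat : Nat) : Int) := by omega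
  rw [hc, pvNext_natCast, Nat.mod_eq_of_lt (by omega), ← main_bridge]

-- named copies of the two loop bodies (definitionally equal to the ports' inline lambdas)
def stepA (st : Int × Int × List (Int × Int)) : Int × Int × List (Int × Int) :=
  let i3 := pvBasisImage st.2.1
  let temp := PySem.Int.mod i3 10
  (temp, i3, st.2.2 ++ [(temp - st.1, temp)])

def stepB (st : Int × List Int) : Int × List Int :=
  let i := pvNext st.1
  (i, st.2 ++ [PySem.Int.mod i 10])

-- the pairwise-delta pass of B, as a function of the digit list
def pairsOf (l : List Int) : List (Int × Int) :=
  (l.zip l.tail).map (fun p => (p.2 - p.1, p.2))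

theorem zip_tail_append (l : List Int) (a p : Int) (h : l.getLast? = some a) :
    (l ++ [p]).zip (l ++ [p]).tail = l.zip l.tail ++ [(a, p)] := by
  induction l generalizing a with
  | nil => simp at h
  | cons b t ih =>
    cases t with
    | nil => simp_all
    | cons c t' =>
      have h' : (c :: t').getLast? = some a := by
        rwa [List.getLast?_cons_cons] at h
      simpa using ih a h'

theorem pairsOf_append (l : List Int) (a p : Int) (h : l.getLast? = some a) :
    pairsOf (l ++ [p]) = pairsOf l ++ [(p - a, p)] := by
  unfold pairsOf
  rw [zip_tail_append l a p h]
  simp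

theorem fold_inv (n : Nat) (x : Int) :
    ((List.range n).foldl (fun st _ => stepB st) (PySem.Int.mod x 16777216, [PySem.Int.mod x 10])).1
      = PySem.Int.mod ((List.range n).foldl (fun st _ => stepA st) (PySem.Int.mod x 10, x, ([] : List (Int × Int)))).2.1 16777216 ∧
    ((List.range n).foldl (fun st _ => stepB st) (PySem.Int.mod x 16777216, [PySem.Int.mod x 10])).2.getLast?
      = some ((List.range n).foldl (fun st _ => stepA st) (PySem.Int.mod x 10, x, ([] : List (Int × Int)))).1 ∧
    ((List.range n).foldl (fun st _ => stepA st) (PySem.Int.mod x 10, x, ([] : List (Int × Int)))).2.2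
      = pairsOf ((List.range n).foldl (fun st _ => stepB st) (PySem.Int.mod x 16777216, [PySem.Int.mod x 10])).2 := by
  induction n with
  | zero => exact ⟨rfl, rfl, rfl⟩
  | succ n ih =>
    obtain ⟨h1, h2, h3⟩ := ih
    rw [List.range_succ, List.foldl_append, List.foldl_append]
    simp only [List.foldl_cons, List.foldl_nil]
    set A := (List.range n).foldl (fun st _ => stepA st) (PySem.Int.mod x 10, x, ([] : List (Int × Int))) with hA
    set B := (List.range n).foldl (fun st _ => stepB st) (PySem.Int.mod x 16777216, [PySem.Int.mod x 10]) with hB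
    have hnext : pvNext B.1 = pvBasisImage A.2.1 := by rw [h1, pvNext_mod]
    refine ⟨?_, ?_, ?_⟩
    · show (stepB B).1 = PySem.Int.mod (stepA A).2.1 16777216
      simp only [stepB, stepA, hnext]
      rw [main_bridge, mod_stepN_cast]
    · show (stepB B).2.getLast? = some (stepA A).1
      simp only [stepB, stepA, hnext]
      simp
    · show (stepA A).2.2 = pairsOf (stepB B).2
      simp only [stepB, stepA, hnext]
      rw [pairsOf_append B.2 A.1 (PySem.Int.mod (pvBasisImage A.2.1) 10) h2, ← h3]

set_option maxRecDepth 4096 in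
theorem calc_secret_eq (x : Int) (secrets : List (Int × Int)) :
    calc_secret x secrets = calc_secret_alt x secrets := by
  obtain ⟨h1, h2, h3⟩ := fold_inv 2000 x
  have e1 : calc_secret x secrets
      = ((List.range 2000).foldl (fun st _ => stepA st)
          (PySem.Int.mod x 10, x, ([] : List (Int × Int)))).2.2 := by
    unfold calc_secret
    exact congrArg (fun t : Int × Int × List (Int × Int) => t.2.2)
      (List.foldl_ext _ _ _ (fun a b _ => rfl))
  have e2 : calc_secret_alt x secrets
      = pairsOf ((List.range 2000).foldl (fun st _ => stepB st)
          (PySem.Int.mod x 16777216, [PySem.Int.mod x 10])).2 := by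
    unfold calc_secret_alt
    simp only [PySem.List.slice_from_one, pairsOf]
    have hb : List.foldl
        (fun (st : Int × List Int) (_ : Nat) => (pvNext st.1, st.2 ++ [PySem.Int.mod (pvNext st.1) 10]))
        (PySem.Int.mod x 16777216, [PySem.Int.mod x 10]) (List.range 2000)
        = List.foldl (fun st _ => stepB st) (PySem.Int.mod x 16777216, [PySem.Int.mod x 10]) (List.range 2000) :=
      List.foldl_ext _ _ _ (fun a b _ => rfl)
    rw [hb]
  rw [e1, e2, h3]

-- ===== VERDICT =====
theorem calc_secret_spec : Claim_equal_calc_secret := by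
  intro x secrets _
  exact calc_secret_eq x secrets
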